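-- pv_equiv track=rewrite | github.com/Franklalalala/learn_2dmatpedia | src/learn_2dmatpedia/filter_db_with_elements.py | is_material_eligible
-- ===== SOURCE A (Python) =====
-- def is_material_eligible(elements_list):
--     """
--     Check if a material meets the screening criteria:
--     1. Contains only elements from the first 4 rows of the periodic table
--     2. No noble gas elements
--     3. No transitional elements from Sc to Ni
--
--     Parameters:
--     -----------
--     elements_list : list
--         List of elements in the material
--
--     Returns:
--     --------
--     bool
--         True if the material meets all criteria, False otherwise
--     """
--     # First 4 rows of the periodic table (excluding H)
--     first_4_rows = set([
--         'H', 'He',  # Row 1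
--         'Li', 'Be', 'B', 'C', 'N', 'O', 'F', 'Ne',  # Row 2
--         'Na', 'Mg', 'Al', 'Si', 'P', 'S', 'Cl', 'Ar',  # Row 3
--         'K', 'Ca', 'Sc', 'Ti', 'V', 'Cr', 'Mn', 'Fe', 'Co', 'Ni',  # Row 4 (part 1)
--         'Cu', 'Zn', 'Ga', 'Ge', 'As', 'Se', 'Br', 'Kr'  # Row 4 (part 2)
--     ])
--
--     # Noble gases
--     noble_gases = set(['He', 'Ne', 'Ar', 'Kr'])
--
--     # Transition metals from Sc to Ni
--     transition_metals = set(['Sc', 'Ti', 'V', 'Cr', 'Mn', 'Fe', 'Co', 'Ni'])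
--
--     # Check if all elements are in the first 4 rows
--     if not all(element in first_4_rows for element in elements_list):
--         return False
--
--     # Check if there are no noble gases
--     if any(element in noble_gases for element in elements_list):
--         return False
--
--     # Check if there are no transition metals from Sc to Ni
--     if any(element in transition_metals for element in elements_list):
--         return False
--
--     return True
-- ===== SOURCE B (Python) =====
-- # Atomic-number table for the first 36 elements (rows 1-4 of the periodic table).
-- ATOMIC_NUMBER = {
--     'H': 1, 'He': 2,
--     'Li': 3, 'Be': 4, 'B': 5, 'C': 6, 'N': 7, 'O': 8, 'F': 9, 'Ne': 10,
--     'Na': 11, 'Mg': 12, 'Al': 13, 'Si': 14, 'P': 15, 'S': 16, 'Cl': 17, 'Ar': 18,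
--     'K': 19, 'Ca': 20, 'Sc': 21, 'Ti': 22, 'V': 23, 'Cr': 24, 'Mn': 25, 'Fe': 26,
--     'Co': 27, 'Ni': 28, 'Cu': 29, 'Zn': 30, 'Ga': 31, 'Ge': 32, 'As': 33,
--     'Se': 34, 'Br': 35, 'Kr': 36,
-- }
--
--
-- def is_material_eligible(elements_list):
--     # Screen numerically by atomic number: the symbol must be one of the first
--     # 36 elements (rows 1-4), not a noble gas (Z in {2, 10, 18, 36}) and not a
--     # transition metal Sc..Ni (21 <= Z <= 28). Early exit on the first offender.
--     for e in elements_list: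
--         z = ATOMIC_NUMBER.get(e)
--         if z is None or z in (2, 10, 18, 36) or 21 <= z <= 28:
--             return False
--     return True
-- ===== Notes on version B (the rewrite author's own statement) =====
-- stated objective: alternative
-- what changed: Replaces A's three literal string sets and three staged scans by an atomic-number lookup table: one early-exit pass maps each symbol to its atomic number Z and screens numerically (Z exists and Z <= 36, Z not in {2,10,18,36}, not 21 <= Z <= 28).
import Mathlib
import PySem

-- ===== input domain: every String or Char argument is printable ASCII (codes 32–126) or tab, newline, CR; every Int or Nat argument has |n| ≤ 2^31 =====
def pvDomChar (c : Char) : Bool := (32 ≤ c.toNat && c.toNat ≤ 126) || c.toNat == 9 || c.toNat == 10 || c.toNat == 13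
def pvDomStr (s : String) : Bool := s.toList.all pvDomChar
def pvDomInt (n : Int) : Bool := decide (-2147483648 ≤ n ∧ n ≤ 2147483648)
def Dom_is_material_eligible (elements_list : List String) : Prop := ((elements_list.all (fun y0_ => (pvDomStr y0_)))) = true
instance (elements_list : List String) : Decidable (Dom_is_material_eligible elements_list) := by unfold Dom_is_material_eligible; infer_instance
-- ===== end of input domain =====

-- B replaces A's three literal string sets and three staged scans by an
-- atomic-number lookup table and one early-exit pass that screens each symbol's
-- atomic number Z numerically (objective: alternative).

-- ===== PORT A =====
def pvFirst4 : PySem.Set String := PySem.Set.ofList [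
  "H", "He",
  "Li", "Be", "B", "C", "N", "O", "F", "Ne",
  "Na", "Mg", "Al", "Si", "P", "S", "Cl", "Ar",
  "K", "Ca", "Sc", "Ti", "V", "Cr", "Mn", "Fe", "Co", "Ni",
  "Cu", "Zn", "Ga", "Ge", "As", "Se", "Br", "Kr"]

def pvNoble : PySem.Set String := PySem.Set.ofList ["He", "Ne", "Ar", "Kr"]

def pvTrans : PySem.Set String :=
  PySem.Set.ofList ["Sc", "Ti", "V", "Cr", "Mn", "Fe", "Co", "Ni"]

def is_material_eligible (elements_list : List String) : Bool :=
  if !(elements_list.all (fun element => PySem.Set.contains pvFirst4 element)) then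
    false
  else if elements_list.any (fun element => PySem.Set.contains pvNoble element) then
    false
  else if elements_list.any (fun element => PySem.Set.contains pvTrans element) then
    false
  else
    true

-- ===== PORT B =====
def pvAtomic : PySem.Dict String Int := PySem.Dict.ofList [
  ("H", 1), ("He", 2),
  ("Li", 3), ("Be", 4), ("B", 5), ("C", 6), ("N", 7), ("O", 8), ("F", 9), ("Ne", 10),
  ("Na", 11), ("Mg", 12), ("Al", 13), ("Si", 14), ("P", 15), ("S", 16), ("Cl", 17), ("Ar", 18),
  ("K", 19), ("Ca", 20), ("Sc", 21), ("Ti", 22), ("V", 23), ("Cr", 24), ("Mn", 25), ("Fe", 26),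
  ("Co", 27), ("Ni", 28), ("Cu", 29), ("Zn", 30), ("Ga", 31), ("Ge", 32), ("As", 33),
  ("Se", 34), ("Br", 35), ("Kr", 36)]

def is_material_eligible_alt (elements_list : List String) : Bool :=
  match elements_list with
  | [] => true
  | e :: rest =>
    match PySem.Dict.get? pvAtomic e with
    | none => false
    | some z =>
      if z = 2 ∨ z = 10 ∨ z = 18 ∨ z = 36 ∨ (21 ≤ z ∧ z ≤ 28) then false
      else is_material_eligible_alt rest

-- ===== PRECONDITION & SPEC =====
def Spec_is_material_eligible (elements_list : List String) (out : Bool) : Prop := out = is_material_eligible_alt elements_list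
instance (elements_list : List String) (out : Bool) : Decidable (Spec_is_material_eligible elements_list out) := by unfold Spec_is_material_eligible; infer_instance

-- ===== CLAIM (what is proved, stated in full; the proofs are below) =====
def Claim_equal_is_material_eligible : Prop := ∀ (elements_list : List String), Dom_is_material_eligible elements_list → Spec_is_material_eligible elements_list (is_material_eligible elements_list)

-- ===== LEMMAS AND PROOFS =====

-- B's per-element test as a predicate (the loop body without the early exit)
def pvOkB (e : String) : Bool :=
  match PySem.Dict.get? pvAtomic e with
  | none => false
  | some z => !(z = 2 ∨ z = 10 ∨ z = 18 ∨ z = 36 ∨ (21 ≤ z ∧ z ≤ 28))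

-- one step of B's early-exit loop
set_option maxRecDepth 2000000 in
theorem pv_alt_cons (e : String) (rest : List String) :
    is_material_eligible_alt (e :: rest) =
      (match PySem.Dict.get? pvAtomic e with
       | none => false
       | some z =>
         if z = 2 ∨ z = 10 ∨ z = 18 ∨ z = 36 ∨ (21 ≤ z ∧ z ≤ 28) then false
         else is_material_eligible_alt rest) := rfl

-- B's early-exit loop computes the conjunction of pvOkB over the list
theorem pv_loop_all (l : List String) :
    is_material_eligible_alt l = l.all pvOkB := by
  induction l with
  | nil => rfl
  | cons e rest ih =>
    rw [pv_alt_cons, List.all_cons]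
    cases h : PySem.Dict.get? pvAtomic e with
    | none =>
      have hok : pvOkB e = false := by unfold pvOkB; rw [h]
      show (false : Bool) = (pvOkB e && rest.all pvOkB)
      rw [hok]; rfl
    | some z =>
      have hok : pvOkB e = !decide (z = 2 ∨ z = 10 ∨ z = 18 ∨ z = 36 ∨ (21 ≤ z ∧ z ≤ 28)) := by
        unfold pvOkB; rw [h]
      show (if z = 2 ∨ z = 10 ∨ z = 18 ∨ z = 36 ∨ (21 ≤ z ∧ z ≤ 28) then (false : Bool)
            else is_material_eligible_alt rest) = (pvOkB e && rest.all pvOkB)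
      by_cases hz : z = 2 ∨ z = 10 ∨ z = 18 ∨ z = 36 ∨ (21 ≤ z ∧ z ≤ 28)
      · rw [hok, if_pos hz]; simp [hz]
      · rw [hok, if_neg hz, ih]; simp [hz]

-- the 36 symbols of A's first_4_rows set, in order (= the keys of pvAtomic)
def pvSyms : List String := [
  "H", "He",
  "Li", "Be", "B", "C", "N", "O", "F", "Ne",
  "Na", "Mg", "Al", "Si", "P", "S", "Cl", "Ar",
  "K", "Ca", "Sc", "Ti", "V", "Cr", "Mn", "Fe", "Co", "Ni",
  "Cu", "Zn", "Ga", "Ge", "As", "Se", "Br", "Kr"]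

set_option maxRecDepth 2000000 in
theorem pv_keys_atomic : pvAtomic.keys = pvSyms := by rfl

-- per-element: B's numeric screening of the looked-up Z = A's three membership tests
set_option maxRecDepth 2000000 in
set_option maxHeartbeats 2000000 in
theorem pv_elem_key (e : String) :
    pvOkB e = (PySem.Set.contains pvFirst4 e && !PySem.Set.contains pvNoble e
        && !PySem.Set.contains pvTrans e) := by
  by_cases hm : e ∈ pvSyms
  · simp only [pvSyms, List.mem_cons, List.not_mem_nil, or_false] at hm
    rcases hm with rfl|rfl|rfl|rfl|rfl|rfl|rfl|rfl|rfl|rfl|rfl|rfl|rfl|rfl|rfl|rfl|rfl|rfl|rfl|rfl|rfl|rfl|rfl|rfl|rfl|rfl|rfl|rfl|rfl|rfl|rfl|rfl|rfl|rfl|rfl|rfl <;> decide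
  · have hget : pvAtomic.get? e = none := by
      rw [PySem.Dict.get?_eq_none_iff_not_mem_keys, pv_keys_atomic]; exact hm
    have h4 : PySem.Set.contains pvFirst4 e = false := by
      rw [Bool.eq_false_iff]
      intro hc
      exact hm (by simpa [pvSyms, pvFirst4, PySem.Set.mem_ofList] using
        (PySem.Set.contains_iff _ _).mp hc)
    unfold pvOkB
    rw [hget, h4]
    rfl

-- ===== VERDICT (by name: the statement is the Claim_ definition above) =====
theorem is_material_eligible_spec : Claim_equal_is_material_eligible := by
  intro l _
  show is_material_eligible l = is_material_eligible_alt l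
  rw [pv_loop_all]
  unfold is_material_eligible
  rw [show pvOkB = (fun e => PySem.Set.contains pvFirst4 e && !PySem.Set.contains pvNoble e
        && !PySem.Set.contains pvTrans e) from funext pv_elem_key]
  split_ifs with h1 h2 h3 <;>
    simp_all [List.all_eq_true, List.any_eq_true]
  · obtain ⟨x, hx, hxf⟩ := h1
    exact ⟨x, hx, fun h => absurd h hxf⟩
  · obtain ⟨x, hx, hxn⟩ := h2
    exact ⟨x, hx, fun _ h => absurd hxn h⟩
  · obtain ⟨x, hx, hxt⟩ := h3
    exact ⟨x, hx, fun _ _ => hxt⟩
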